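-- pv_equiv track=rewrite | github.com/Mark1amgad/search-algorithm-simulator | Projects/app.py | greedy_traversal
-- ===== SOURCE A (Python) =====
-- from queue import PriorityQueue
--
-- def greedy_traversal(graph, start, goal):
--     visited = set()
--     traversal_path = []
--
--     pq = PriorityQueue()
--     pq.put((abs(goal - start), start, [start]))
--
--     while not pq.empty():
--         h, current, path = pq.get()
--
--         if current in visited:
--             continue
--
--         visited.add(current)
--         traversal_path.append(current)
--
--         if current == goal:
--             return True, traversal_path
--
--         if current in graph:
--             for neighbor in graph[current]:
--                 if neighbor not in visited:
--                     pq.put((abs(goal - neighbor), neighbor, path + [neighbor]))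
--
--     return False, traversal_path
-- ===== SOURCE B (Python) =====
-- def greedy_traversal(graph, start, goal):
--     # Frontier is a SET OF NODES, not a heap of (h, node, path) triples: the
--     # heuristic h = abs(goal - n) is a function of the node, so the next node to
--     # visit is just the frontier node minimizing (abs(goal - n), n); that key is
--     # injective in n, so min() is deterministic regardless of set order.  The
--     # dead `path` bookkeeping and the visited-skip branch disappear entirely.
--     visited = set()
--     traversal_path = []
--     frontier = {start}
--
--     while frontier:
--         current = min(frontier, key=lambda n: (abs(goal - n), n))
--         frontier.remove(current)
--         visited.add(current)
--         traversal_path.append(current)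
--         if current == goal:
--             return True, traversal_path
--         for neighbor in graph.get(current, []):
--             if neighbor not in visited:
--                 frontier.add(neighbor)
--     return False, traversal_path
-- ===== Notes on version B (the rewrite author's own statement) =====
-- stated objective: simpler
-- what changed: The frontier becomes a plain set of NODES picked by min over the key (abs(goal-n), n), instead of A's PriorityQueue of (h, node, path) triples: the heuristic depends only on the node and the key is injective, so the path component and the visited-skip branch of A are dead weight and are removed.
import Mathlib
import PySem

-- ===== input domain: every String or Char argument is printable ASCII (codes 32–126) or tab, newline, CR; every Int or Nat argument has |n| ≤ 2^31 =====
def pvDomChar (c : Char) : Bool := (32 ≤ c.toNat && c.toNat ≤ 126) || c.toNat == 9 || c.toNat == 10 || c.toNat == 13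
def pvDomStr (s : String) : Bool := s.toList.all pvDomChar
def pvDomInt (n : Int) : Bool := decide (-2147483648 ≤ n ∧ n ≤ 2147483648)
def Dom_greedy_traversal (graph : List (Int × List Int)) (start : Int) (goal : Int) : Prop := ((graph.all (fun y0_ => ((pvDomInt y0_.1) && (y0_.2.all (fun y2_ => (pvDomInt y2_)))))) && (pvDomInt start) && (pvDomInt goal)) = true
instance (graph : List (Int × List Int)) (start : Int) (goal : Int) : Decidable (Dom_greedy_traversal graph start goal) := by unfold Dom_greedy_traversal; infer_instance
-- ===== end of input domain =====

-- B drops A's PriorityQueue of (h, node, path) triples for a plain node-set frontier picked by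
-- min over the key (|goal-n|, n); objective: simpler (the path bookkeeping and the visited-skip
-- branch disappear).

-- ===== PORT A =====
-- A's PriorityQueue of (h, node, path) tuples, modelled as a list kept sorted by Python's
-- lexicographic tuple order pvBle: put = ordered insert, get = head.  Ties under pvBle are
-- fully-equal tuples, so this models the heap exactly.

-- Python `l1 <= l2` on lists of ints (lexicographic; exact for ints)
def pvLleb : List Int → List Int → Bool
  | [], _ => true
  | _ :: _, [] => false
  | x :: xs, y :: ys => if x < y then true else if y < x then false else pvLleb xs ys

-- Python `t1 <= t2` on (Int, Int, List Int) tuples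
def pvBle (a b : Int × Int × List Int) : Bool :=
  if a.1 < b.1 then true else if b.1 < a.1 then false
  else if a.2.1 < b.2.1 then true else if b.2.1 < a.2.1 then false
  else pvLleb a.2.2 b.2.2

def pvOins (e : Int × Int × List Int) : List (Int × Int × List Int) → List (Int × Int × List Int)
  | [] => [e]
  | x :: t => if pvBle e x then e :: x :: t else x :: pvOins e t

-- Fuel bound for the while-loop: every queue/frontier item is the initial one or comes from an
-- adjacency list of a node expanded at most once, so total pops ≤ 1 + Σ adjacency lengths.
-- Both ports use the same guard; it is provably never exhausted on real runs (totality guard only).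
def pvFuel (graph : List (Int × List Int)) : Nat :=
  graph.foldl (fun a p => a + p.2.length) 0 + 2

def pvLoopA (graph : List (Int × List Int)) (goal : Int) :
    Nat → List (Int × Int × List Int) → PySem.Set Int → List Int → Bool × List Int
  | 0, _, _, path => (false, path)
  | _ + 1, [], _, path => (false, path)
  | f + 1, (_, cur, p) :: rest, vis, path =>
    if PySem.Set.contains vis cur then pvLoopA graph goal f rest vis path
    else
      let vis' := PySem.Set.add vis cur
      let path' := path ++ [cur]
      if cur = goal then (true, path')
      else
        match (PySem.Dict.mk graph).get? cur with
        | some nbrs =>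
            pvLoopA graph goal f
              (nbrs.foldl (fun q n =>
                if PySem.Set.contains vis' n then q
                else pvOins (|goal - n|, n, p ++ [n]) q) rest) vis' path'
        | none => pvLoopA graph goal f rest vis' path'

def greedy_traversal (graph : List (Int × List Int)) (start : Int) (goal : Int) : Bool × List Int :=
  pvLoopA graph goal (pvFuel graph) [(|goal - start|, start, [start])] PySem.Set.empty []

-- ===== PORT B =====
-- B's frontier is a SET OF NODES (PySem.Set).  current = min(frontier, key=λ n, (|goal-n|, n)):
-- the key is injective in n, so the minimum is unique and Python's hash iteration order cannot
-- influence the result; the fold keeps the incumbent on (impossible) ties, exactly Python's min.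
-- frontier.remove(current) is Set.discard (current is always a member, so KeyError is unreachable).

-- Python `(|goal-a|, a) < (|goal-b|, b)` (strict lexicographic key comparison)
def pvKeyLtb (goal a b : Int) : Bool :=
  decide (|goal - a| < |goal - b| ∨ (|goal - a| = |goal - b| ∧ a < b))

def pvMinBy (goal : Int) (a : Int) (l : List Int) : Int :=
  l.foldl (fun m x => if pvKeyLtb goal x m then x else m) a

def pvLoopB (graph : List (Int × List Int)) (goal : Int) :
    Nat → PySem.Set Int → PySem.Set Int → List Int → Bool × List Int
  | 0, _, _, path => (false, path)
  | _ + 1, [], _, path => (false, path)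
  | f + 1, s0 :: st, vis, path =>
    let cur := pvMinBy goal s0 st
    let frontier' := PySem.Set.discard (s0 :: st) cur
    let vis' := PySem.Set.add vis cur
    let path' := path ++ [cur]
    if cur = goal then (true, path')
    else
      pvLoopB graph goal f
        (((PySem.Dict.mk graph).getD cur []).foldl
          (fun fr n => if PySem.Set.contains vis' n then fr else PySem.Set.add fr n) frontier')
        vis' path'

def greedy_traversal_alt (graph : List (Int × List Int)) (start : Int) (goal : Int) : Bool × List Int :=
  pvLoopB graph goal (pvFuel graph) (PySem.Set.add PySem.Set.empty start) PySem.Set.empty []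

-- ===== PRECONDITION & SPEC =====
def Spec_greedy_traversal (graph : List (Int × List Int)) (start : Int) (goal : Int) (out : Bool × List Int) : Prop := out = greedy_traversal_alt graph start goal
instance (graph : List (Int × List Int)) (start : Int) (goal : Int) (out : Bool × List Int) : Decidable (Spec_greedy_traversal graph start goal out) := by unfold Spec_greedy_traversal; infer_instance

-- ===== CLAIM (what is proved, stated in full; the proofs are below) =====
def Claim_equal_greedy_traversal : Prop := ∀ (graph : List (Int × List Int)) (start : Int) (goal : Int), Dom_greedy_traversal graph start goal → Spec_greedy_traversal graph start goal (greedy_traversal graph start goal)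

-- ===== LEMMAS AND PROOFS =====

def pvR (a b : Int × Int × List Int) : Prop := pvBle a b = true

-- Measure: Σ over graph entries with an unvisited key of the adjacency length.
def pvMsum (graph : List (Int × List Int)) (vis : PySem.Set Int) : Nat :=
  (graph.map (fun p => if PySem.Set.contains vis p.1 then 0 else p.2.length)).sum

theorem pvOins_perm (e : Int × Int × List Int) (q : List (Int × Int × List Int)) :
    (pvOins e q).Perm (e :: q) := by
  induction q with
  | nil => simp [pvOins]
  | cons x t ih =>
    simp only [pvOins]
    split_ifs
    · exact List.Perm.refl _
    · exact (List.Perm.cons x ih).trans (List.Perm.swap _ _ _)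

theorem pvLleb_total (l m : List Int) (h : pvLleb l m = false) : pvLleb m l = true := by
  induction l generalizing m with
  | nil => simp [pvLleb] at h
  | cons x xs ih =>
    cases m with
    | nil => simp [pvLleb]
    | cons y ys =>
      simp only [pvLleb] at h ⊢
      split_ifs at h ⊢ <;> first | rfl | omega | exact ih ys h

theorem pvBle_total (a b : Int × Int × List Int) (h : pvBle a b = false) : pvBle b a = true := by
  simp only [pvBle] at h ⊢
  split_ifs at h ⊢ <;> first | rfl | omega | exact pvLleb_total _ _ h

theorem pvLleb_trans (l m k : List Int) (h1 : pvLleb l m = true) (h2 : pvLleb m k = true) : pvLleb l k = true := by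
  induction l generalizing m k with
  | nil => simp [pvLleb]
  | cons x xs ih =>
    cases m with
    | nil => simp [pvLleb] at h1
    | cons y ys =>
      cases k with
      | nil => simp [pvLleb] at h2
      | cons z zs =>
        simp only [pvLleb] at h1 h2 ⊢
        split_ifs at h1 h2 ⊢ <;>
          first
            | rfl
            | (exfalso; omega)
            | exact absurd h1 Bool.false_ne_true
            | exact absurd h2 Bool.false_ne_true
            | exact ih ys zs h1 h2

theorem pvBle_trans (a b c : Int × Int × List Int) (h1 : pvBle a b = true) (h2 : pvBle b c = true) : pvBle a c = true := by
  simp only [pvBle] at h1 h2 ⊢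
  split_ifs at h1 h2 ⊢ <;>
    first
      | rfl
      | (exfalso; omega)
      | exact absurd h1 Bool.false_ne_true
      | exact absurd h2 Bool.false_ne_true
      | exact pvLleb_trans _ _ _ h1 h2

theorem pvOins_pairwise (e : Int × Int × List Int) (q : List (Int × Int × List Int))
    (h : q.Pairwise pvR) : (pvOins e q).Pairwise pvR := by
  induction q with
  | nil => simp [pvOins, pvR]
  | cons x t ih =>
    rcases List.pairwise_cons.mp h with ⟨hx, ht⟩
    simp only [pvOins]
    by_cases hex : pvBle e x = true
    · simp only [if_pos hex]
      refine List.pairwise_cons.mpr ⟨?_, h⟩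
      intro y hy
      rcases List.mem_cons.mp hy with rfl | hy'
      · exact hex
      · exact pvBle_trans _ _ _ hex (hx _ hy')
    · simp only [if_neg hex]
      refine List.pairwise_cons.mpr ⟨?_, ih ht⟩
      intro y hy
      have hy' : y = e ∨ y ∈ t := by
        simpa using ((pvOins_perm e t).mem_iff).mp hy
      rcases hy' with rfl | hy'
      · exact pvBle_total _ _ (by simpa using hex)
      · exact hx _ hy'

-- ---- folds on the A side ----

theorem pvFoldIns_mem (c : Int → Bool) (mk : Int → Int × Int × List Int) (nbrs : List Int)
    (q : List (Int × Int × List Int)) (y : Int × Int × List Int) :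
    y ∈ nbrs.foldl (fun q n => if c n then q else pvOins (mk n) q) q ↔
      y ∈ q ∨ ∃ n ∈ nbrs, c n = false ∧ y = mk n := by
  induction nbrs generalizing q with
  | nil => simp
  | cons n ns ih =>
    simp only [List.foldl_cons]
    by_cases hc : c n = true
    · rw [if_pos hc, ih]
      constructor
      · rintro (h | ⟨m, hm, hcm, rfl⟩)
        · exact Or.inl h
        · exact Or.inr ⟨m, by simp [hm], hcm, rfl⟩
      · rintro (h | ⟨m, hm, hcm, rfl⟩)
        · exact Or.inl h
        · rcases List.mem_cons.mp hm with rfl | hm'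
          · exact absurd hc (by simp [hcm])
          · exact Or.inr ⟨m, hm', hcm, rfl⟩
    · rw [if_neg hc, ih]
      have hmem : y ∈ pvOins (mk n) q ↔ y = mk n ∨ y ∈ q := by
        simpa using (pvOins_perm (mk n) q).mem_iff
      rw [hmem]
      constructor
      · rintro ((rfl | h) | ⟨m, hm, hcm, rfl⟩)
        · exact Or.inr ⟨n, by simp, by simpa using hc, rfl⟩
        · exact Or.inl h
        · exact Or.inr ⟨m, by simp [hm], hcm, rfl⟩
      · rintro (h | ⟨m, hm, hcm, rfl⟩)
        · exact Or.inl (Or.inr h)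
        · rcases List.mem_cons.mp hm with rfl | hm'
          · exact Or.inl (Or.inl rfl)
          · exact Or.inr ⟨m, hm', hcm, rfl⟩

theorem pvFoldIns_pairwise (c : Int → Bool) (mk : Int → Int × Int × List Int) (nbrs : List Int)
    (q : List (Int × Int × List Int)) (h : q.Pairwise pvR) :
    (nbrs.foldl (fun q n => if c n then q else pvOins (mk n) q) q).Pairwise pvR := by
  induction nbrs generalizing q with
  | nil => exact h
  | cons n ns ih =>
    simp only [List.foldl_cons]
    by_cases hc : c n = true
    · rw [if_pos hc]; exact ih q h
    · rw [if_neg hc]; exact ih _ (pvOins_pairwise _ _ h)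

theorem pvFoldIns_length (c : Int → Bool) (mk : Int → Int × Int × List Int) (nbrs : List Int)
    (q : List (Int × Int × List Int)) :
    (nbrs.foldl (fun q n => if c n then q else pvOins (mk n) q) q).length ≤ q.length + nbrs.length := by
  induction nbrs generalizing q with
  | nil => simp
  | cons n ns ih =>
    simp only [List.foldl_cons, List.length_cons]
    by_cases hc : c n = true
    · rw [if_pos hc]; have := ih q; omega
    · rw [if_neg hc]
      have hlen : (pvOins (mk n) q).length = q.length + 1 := by
        simpa using (pvOins_perm (mk n) q).length_eq
      have := ih (pvOins (mk n) q); omega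

-- ---- folds on the B side ----

theorem pvFoldAdd_mem (c : Int → Bool) (nbrs : List Int) (S : PySem.Set Int) (y : Int) :
    y ∈ nbrs.foldl (fun fr n => if c n then fr else PySem.Set.add fr n) S ↔
      y ∈ S ∨ (y ∈ nbrs ∧ c y = false) := by
  induction nbrs generalizing S with
  | nil => simp
  | cons n ns ih =>
    simp only [List.foldl_cons]
    by_cases hc : c n = true
    · rw [if_pos hc, ih]
      constructor
      · rintro (h | ⟨hm, hcm⟩)
        · exact Or.inl h
        · exact Or.inr ⟨by simp [hm], hcm⟩
      · rintro (h | ⟨hm, hcm⟩)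
        · exact Or.inl h
        · rcases List.mem_cons.mp hm with rfl | hm'
          · exact absurd hc (by simp [hcm])
          · exact Or.inr ⟨hm', hcm⟩
    · rw [if_neg hc, ih, PySem.Set.mem_add]
      constructor
      · rintro ((h | rfl) | ⟨hm, hcm⟩)
        · exact Or.inl h
        · exact Or.inr ⟨by simp, by simpa using hc⟩
        · exact Or.inr ⟨by simp [hm], hcm⟩
      · rintro (h | ⟨hm, hcm⟩)
        · exact Or.inl (Or.inl h)
        · rcases List.mem_cons.mp hm with rfl | hm'
          · exact Or.inl (Or.inr rfl)
          · exact Or.inr ⟨hm', hcm⟩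

theorem pvFoldAdd_nodup (c : Int → Bool) (nbrs : List Int) (S : PySem.Set Int) (h : S.Nodup) :
    (nbrs.foldl (fun fr n => if c n then fr else PySem.Set.add fr n) S).Nodup := by
  induction nbrs generalizing S with
  | nil => exact h
  | cons n ns ih =>
    simp only [List.foldl_cons]
    by_cases hc : c n = true
    · rw [if_pos hc]; exact ih S h
    · rw [if_neg hc]; exact ih _ (PySem.Set.nodup_add _ _ h)

theorem pvFoldAdd_length (c : Int → Bool) (nbrs : List Int) (S : PySem.Set Int) :
    (nbrs.foldl (fun fr n => if c n then fr else PySem.Set.add fr n) S).length ≤ S.length + nbrs.length := by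
  induction nbrs generalizing S with
  | nil => simp
  | cons n ns ih =>
    simp only [List.foldl_cons, List.length_cons]
    by_cases hc : c n = true
    · rw [if_pos hc]; have := ih S; omega
    · rw [if_neg hc]
      have hlen : (PySem.Set.add S n).length ≤ S.length + 1 := by
        rw [PySem.Set.add]
        split_ifs <;> simp
      have := ih (PySem.Set.add S n); omega

-- ---- measure lemmas ----

theorem pvContains_add (vis : PySem.Set Int) (cur x : Int) :
    PySem.Set.contains (PySem.Set.add vis cur) x = (PySem.Set.contains vis x || decide (x = cur)) := by
  simp only [PySem.Set.add]
  by_cases h : PySem.Set.contains vis cur = true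
  · rw [if_pos h]
    by_cases hxc : x = cur
    · subst hxc
      simp
      exact (PySem.Set.contains_iff _ _).mp h
    · simp [hxc]
  · rw [if_neg h]
    simp [PySem.Set.contains]

theorem pvMsum_add_le (graph : List (Int × List Int)) (vis : PySem.Set Int) (cur : Int) :
    pvMsum graph (PySem.Set.add vis cur) ≤ pvMsum graph vis := by
  unfold pvMsum
  apply List.sum_le_sum
  intro p _
  rw [pvContains_add]
  by_cases h : p.1 ∈ vis
  · by_cases h2 : p.1 = cur <;> simp [h, h2]
  · by_cases h2 : p.1 = cur <;> simp [h, h2]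

theorem pvMsum_got (graph : List (Int × List Int)) (vis : PySem.Set Int) (cur : Int)
    (nbrs : List Int) (hv : PySem.Set.contains vis cur = false)
    (hg : (PySem.Dict.mk graph).get? cur = some nbrs) :
    nbrs.length + pvMsum graph (PySem.Set.add vis cur) ≤ pvMsum graph vis := by
  induction graph with
  | nil => simp [PySem.Dict.get?] at hg
  | cons p rest ih =>
    rw [PySem.Dict.get?_mk_cons] at hg
    unfold pvMsum
    simp only [List.map_cons, List.sum_cons]
    by_cases hk : p.1 == cur
    · have hk' : p.1 = cur := by simpa using hk
      rw [if_pos hk] at hg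
      have hnb : nbrs = p.2 := by simpa using hg.symm
      have hc1 : PySem.Set.contains (PySem.Set.add vis cur) p.1 = true := by
        rw [pvContains_add]; simp [hk']
      have hc2 : PySem.Set.contains vis p.1 = false := by rw [hk']; exact hv
      rw [hc2, if_pos hc1, if_neg (by simp)]
      rw [hnb]
      have := pvMsum_add_le rest vis cur
      unfold pvMsum at this
      omega
    · rw [if_neg hk] at hg
      have hk' : p.1 ≠ cur := by simpa using hk
      have hc : PySem.Set.contains (PySem.Set.add vis cur) p.1 = PySem.Set.contains vis p.1 := by
        rw [pvContains_add]; simp [hk']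
      rw [hc]
      have := ih hg
      unfold pvMsum at this
      omega

theorem pvFuel_eq (graph : List (Int × List Int)) :
    pvFuel graph = pvMsum graph PySem.Set.empty + 2 := by
  unfold pvFuel pvMsum
  congr 1
  simp [PySem.Set.contains, PySem.Set.empty]
  rw [List.sum_eq_foldl, List.foldl_map]

-- ---- min-selection lemmas ----

theorem pvKeyLtb_irrefl (goal a : Int) : pvKeyLtb goal a a = false := by
  simp [pvKeyLtb]

theorem pvKeyLtb_asymm (goal a b : Int) (h : pvKeyLtb goal a b = true) :
    pvKeyLtb goal b a = false := by
  simp only [pvKeyLtb, decide_eq_true_eq, decide_eq_false_iff_not] at h ⊢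
  omega

theorem pvMinBy_eq (goal cur : Int) (l : List Int) (acc : Int)
    (hmem : cur = acc ∨ cur ∈ l)
    (hstrict : ∀ x, (x = acc ∨ x ∈ l) → x ≠ cur → pvKeyLtb goal cur x = true) :
    pvMinBy goal acc l = cur := by
  induction l generalizing acc with
  | nil =>
    rcases hmem with rfl | hbad
    · rfl
    · simp at hbad
  | cons x t ih =>
    show pvMinBy goal (if pvKeyLtb goal x acc then x else acc) t = cur
    have hstrict' : ∀ y, (y = (if pvKeyLtb goal x acc then x else acc) ∨ y ∈ t) → y ≠ cur →
        pvKeyLtb goal cur y = true := by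
      intro y hy hne
      rcases hy with hy | hy
      · split_ifs at hy
        · exact hstrict y (Or.inr (by simp [hy])) hne
        · exact hstrict y (Or.inl hy) hne
      · exact hstrict y (Or.inr (by simp [hy])) hne
    have hmem2 : cur = (if pvKeyLtb goal x acc then x else acc) ∨ cur ∈ t := by
      by_cases hax : cur = acc
      · subst hax
        by_cases hx : x = cur
        · subst hx
          rw [pvKeyLtb_irrefl]
          simp
        · rw [pvKeyLtb_asymm goal cur x (hstrict x (Or.inr (by simp)) hx)]
          simp
      · rcases hmem with rfl | hm
        · exact absurd rfl hax
        · rcases List.mem_cons.mp hm with rfl | hm'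
          · rw [hstrict acc (Or.inl rfl) (fun h => hax h.symm)]
            simp
          · exact Or.inr hm'
    exact ih _ hmem2 hstrict'

theorem pvBle_key (goal h cur h' n : Int) (p p' : List Int)
    (hA : pvBle (h, cur, p) (h', n, p') = true)
    (e1 : h = |goal - cur|) (e2 : h' = |goal - n|) (hne : n ≠ cur) :
    pvKeyLtb goal cur n = true := by
  subst e1 e2
  simp only [pvBle] at hA
  simp only [pvKeyLtb, decide_eq_true_eq]
  split_ifs at hA <;> omega

-- ---- the main simulation ----

theorem pvLoopB_nil (graph : List (Int × List Int)) (goal : Int) (g : Nat)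
    (vis : PySem.Set Int) (path : List Int) :
    pvLoopB graph goal g [] vis path = (false, path) := by
  cases g <;> rfl

theorem pvLoop_eq (graph : List (Int × List Int)) (goal : Int) :
    ∀ (f : Nat), ∀ (g : Nat) (q : List (Int × Int × List Int)) (S : PySem.Set Int)
      (vis : PySem.Set Int) (path : List Int),
      q.Pairwise pvR →
      (∀ e ∈ q, e.1 = |goal - e.2.1|) →
      S.Nodup →
      (∀ n : Int, n ∈ S ↔ (PySem.Set.contains vis n = false ∧ ∃ h p, (h, n, p) ∈ q)) →
      q.length + pvMsum graph vis ≤ f →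
      S.length + pvMsum graph vis ≤ g →
      pvLoopA graph goal f q vis path = pvLoopB graph goal g S vis path := by
  intro f
  induction f with
  | zero =>
    intro g q S vis path _ _ _ h4 h5 _
    have hq : q = [] := by
      cases q with
      | nil => rfl
      | cons e t => simp at h5
    subst hq
    have hS : S = [] := by
      cases S with
      | nil => rfl
      | cons a t =>
        rcases (h4 a).mp (by simp) with ⟨_, _, _, hm⟩
        simp at hm
    subst hS
    rw [pvLoopB_nil]; rfl
  | succ f ih =>
    intro g q S vis path h1 h2 h3 h4 h5 h6
    cases q with
    | nil =>
      have hS : S = [] := by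
        cases S with
        | nil => rfl
        | cons a t =>
          rcases (h4 a).mp (by simp) with ⟨_, _, _, hm⟩
          simp at hm
      subst hS
      rw [pvLoopB_nil]; rfl
    | cons e rest =>
      obtain ⟨h, cur, p⟩ := e
      by_cases hv : PySem.Set.contains vis cur = true
      · -- skip step: the head's node is already visited
        have hA : pvLoopA graph goal (f + 1) ((h, cur, p) :: rest) vis path
            = pvLoopA graph goal f rest vis path := by
          simp only [pvLoopA]
          rw [if_pos hv]
        rw [hA]
        apply ih g rest S vis path (List.pairwise_cons.mp h1).2
          (fun e he => h2 e (by simp [he])) h3 ?_ (by simp at h5 ⊢; omega) h6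
        intro n
        rw [h4 n]
        constructor
        · rintro ⟨hn, h', p', hm⟩
          rcases List.mem_cons.mp hm with heq | hm'
          · exfalso
            have : n = cur := congrArg (fun t => t.2.1) heq
            rw [this] at hn; rw [hv] at hn; exact absurd hn (by simp)
          · exact ⟨hn, h', p', hm'⟩
        · rintro ⟨hn, h', p', hm⟩
          exact ⟨hn, h', p', by simp [hm]⟩
      · -- visit step
        have hvf : PySem.Set.contains vis cur = false := by simpa using hv
        have hcurS : cur ∈ S := (h4 cur).mpr ⟨hvf, h, p, by simp⟩
        cases S with
        | nil => simp at hcurS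
        | cons s0 st =>
          have hh : h = |goal - cur| := h2 (h, cur, p) (by simp)
          have hmin : pvMinBy goal s0 st = cur := by
            apply pvMinBy_eq goal cur st s0 (by simpa using hcurS)
            intro x hx hne
            rcases ((h4 x).mp (by simpa using hx)) with ⟨hxv, hx', px, hm⟩
            rcases List.mem_cons.mp hm with heq | hm'
            · exfalso
              exact hne (congrArg (fun t => t.2.1) heq)
            · have hxh : hx' = |goal - x| := h2 (hx', x, px) (by simp [hm'])
              exact pvBle_key goal h cur hx' x p px
                ((List.pairwise_cons.mp h1).1 _ hm') hh hxh (fun hxc => hne hxc)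
          cases g with
          | zero => simp at h6
          | succ g' =>
            have hBstep : pvLoopB graph goal (g' + 1) (s0 :: st) vis path =
                (if cur = goal then (true, path ++ [cur])
                 else
                   pvLoopB graph goal g'
                     (((PySem.Dict.mk graph).getD cur []).foldl
                       (fun fr n => if PySem.Set.contains (PySem.Set.add vis cur) n then fr
                         else PySem.Set.add fr n) (PySem.Set.discard (s0 :: st) cur))
                     (PySem.Set.add vis cur) (path ++ [cur])) := by
              simp only [pvLoopB, hmin]
            have hAstep : pvLoopA graph goal (f + 1) ((h, cur, p) :: rest) vis path =
                (if cur = goal then (true, path ++ [cur])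
                 else
                   match (PySem.Dict.mk graph).get? cur with
                   | some nbrs =>
                       pvLoopA graph goal f
                         (nbrs.foldl (fun q n =>
                           if PySem.Set.contains (PySem.Set.add vis cur) n then q
                           else pvOins (|goal - n|, n, p ++ [n]) q) rest)
                         (PySem.Set.add vis cur) (path ++ [cur])
                   | none => pvLoopA graph goal f rest (PySem.Set.add vis cur) (path ++ [cur])) := by
              simp only [pvLoopA, hv]; rfl
            rw [hAstep, hBstep]
            by_cases hg : cur = goal
            · rw [if_pos hg, if_pos hg]
            · rw [if_neg hg, if_neg hg]
              -- shared facts about the erased frontier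
              have hS' : ∀ n : Int, n ∈ PySem.Set.discard (s0 :: st) cur ↔
                  (PySem.Set.contains (PySem.Set.add vis cur) n = false ∧ ∃ h' p', (h', n, p') ∈ rest) := by
                intro n
                rw [PySem.Set.mem_discard]
                constructor
                · rintro ⟨hnS, hne⟩
                  rcases (h4 n).mp hnS with ⟨hnv, h', p', hm⟩
                  rcases List.mem_cons.mp hm with heq | hm'
                  · exact absurd (congrArg (fun t => t.2.1) heq) hne
                  · refine ⟨?_, h', p', hm'⟩
                    rw [pvContains_add, hnv]; simp [hne]
                · rintro ⟨hnv, h', p', hm⟩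
                  rw [pvContains_add] at hnv
                  have hne : n ≠ cur := by
                    intro hnc; rw [hnc] at hnv; simp at hnv
                  have hnvis : PySem.Set.contains vis n = false := by
                    rcases Bool.or_eq_false_iff.mp hnv with ⟨hh1, _⟩; exact hh1
                  exact ⟨(h4 n).mpr ⟨hnvis, h', p', by simp [hm]⟩, hne⟩
              have hS'len : (PySem.Set.discard (s0 :: st) cur).length < (s0 :: st).length := by
                rw [PySem.Set.discard]
                rw [List.length_filter_lt_length_iff_exists]
                exact ⟨cur, hcurS, by simp⟩
              have hS'nodup : (PySem.Set.discard (s0 :: st) cur).Nodup :=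
                PySem.Set.nodup_discard _ _ h3
              rcases hG : (PySem.Dict.mk graph).get? cur with _ | nbrs
              · -- current not a key of graph
                rw [PySem.Dict.getD_eq_get?_getD, hG]
                simp only [Option.getD_none, List.foldl_nil]
                apply ih g' rest _ _ _ (List.pairwise_cons.mp h1).2
                  (fun e he => h2 e (by simp [he])) hS'nodup hS'
                · have := pvMsum_add_le graph vis cur
                  simp at h5; omega
                · have := pvMsum_add_le graph vis cur
                  simp at hS'len h6 ⊢
                  omega
              · -- expand nbrs
                rw [PySem.Dict.getD_eq_get?_getD, hG]
                simp only [Option.getD_some]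
                apply ih g'
                · exact pvFoldIns_pairwise _ _ nbrs rest (List.pairwise_cons.mp h1).2
                · intro e he
                  rcases (pvFoldIns_mem _ _ nbrs rest e).mp he with hm | ⟨n, _, _, rfl⟩
                  · exact h2 e (by simp [hm])
                  · rfl
                · exact pvFoldAdd_nodup _ nbrs _ hS'nodup
                · intro n
                  rw [pvFoldAdd_mem]
                  have hfold : (∃ h' p', (h', n, p') ∈ nbrs.foldl (fun q m =>
                      if PySem.Set.contains (PySem.Set.add vis cur) m then q
                      else pvOins (|goal - m|, m, p ++ [m]) q) rest) ↔
                      ((∃ h' p', (h', n, p') ∈ rest) ∨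
                        (n ∈ nbrs ∧ PySem.Set.contains (PySem.Set.add vis cur) n = false)) := by
                    constructor
                    · rintro ⟨h', p', hm⟩
                      rcases (pvFoldIns_mem _ _ nbrs rest _).mp hm with hm' | ⟨m, hmn, hcm, heq⟩
                      · exact Or.inl ⟨h', p', hm'⟩
                      · have : n = m := congrArg (fun t => t.2.1) heq
                        subst this
                        exact Or.inr ⟨hmn, hcm⟩
                    · rintro (⟨h', p', hm⟩ | ⟨hmn, hcn⟩)
                      · exact ⟨h', p', (pvFoldIns_mem _ _ nbrs rest _).mpr (Or.inl hm)⟩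
                      · exact ⟨|goal - n|, p ++ [n],
                          (pvFoldIns_mem _ _ nbrs rest _).mpr (Or.inr ⟨n, hmn, hcn, rfl⟩)⟩
                  rw [hfold, hS' n]
                  constructor
                  · rintro (⟨hnv, hrest⟩ | ⟨hmn, hcn⟩)
                    · exact ⟨hnv, Or.inl hrest⟩
                    · exact ⟨hcn, Or.inr ⟨hmn, hcn⟩⟩
                  · rintro ⟨hnv, hrest | hnb⟩
                    · exact Or.inl ⟨hnv, hrest⟩
                    · exact Or.inr hnb
                · have hq' := pvFoldIns_length (fun m => PySem.Set.contains (PySem.Set.add vis cur) m)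
                    (fun m => (|goal - m|, m, p ++ [m])) nbrs rest
                  have hm' := pvMsum_got graph vis cur nbrs hvf hG
                  simp at h5; omega
                · have hf' := pvFoldAdd_length (fun m => PySem.Set.contains (PySem.Set.add vis cur) m)
                    nbrs (PySem.Set.discard (s0 :: st) cur)
                  have hm' := pvMsum_got graph vis cur nbrs hvf hG
                  simp at hS'len h6
                  omega

-- ===== VERDICT (by name: the statement is the Claim_ definition above) =====
theorem greedy_traversal_spec : Claim_equal_greedy_traversal := by
  intro graph start goal _
  unfold Spec_greedy_traversal greedy_traversal greedy_traversal_alt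
  have hstart : PySem.Set.add PySem.Set.empty start = [start] := by
    simp [PySem.Set.add, PySem.Set.empty, PySem.Set.contains]
  rw [hstart]
  apply pvLoop_eq graph goal (pvFuel graph) (pvFuel graph)
  · simp [pvR]
  · intro e he
    simp only [List.mem_singleton] at he
    subst he
    rfl
  · simp
  · intro n
    simp only [List.mem_singleton]
    constructor
    · rintro rfl
      refine ⟨by simp [PySem.Set.empty, PySem.Set.contains], |goal - n|, [n], by simp⟩
    · rintro ⟨_, h', p', hm⟩
      simp only [Prod.mk.injEq] at hm
      exact hm.2.1
  · rw [pvFuel_eq]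
    simp
    omega
  · rw [pvFuel_eq]
    simp
    omega
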